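-- pv_equiv track=rewrite | github.com/SprocketLab/clip_lexical | main/training_utility.py | prepare_index_for_checking
-- ===== SOURCE A (Python) =====
-- def prepare_index_for_checking(related_id_array):
--     index = []
--     buffer = 0
--     class_count = len(related_id_array)
--     for i in range(5):
--         index.append(i)
--         index.append(i + buffer + class_count)
--         buffer = buffer + len(related_id_array[i])-1
--     return index
-- ===== SOURCE B (Python) =====
-- def prepare_index_for_checking(related_id_array):
--     # Identity: A's i + buffer + class_count, with buffer = sum(len-1) over earlier
--     # rows, equals class_count + (cumulative length of earlier rows).  So recurse
--     # over the row list threading one running position instead of A's buffer.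
--     def go(rows, i, pos):
--         if i == 5:
--             return []
--         return [i, pos] + go(rows[1:], i + 1, pos + len(rows[0]))
--     return go(list(related_id_array), 0, len(related_id_array))
-- ===== Notes on version B (the rewrite author's own statement) =====
-- stated objective: alternative
-- what changed: B drops A's buffer of (len-1) corrections entirely: using the identity i + buffer + class_count = class_count + cumulative length of earlier rows, it recurses structurally over the row list threading a single running position, emitting [i, pos] pairs.
import Mathlib
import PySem

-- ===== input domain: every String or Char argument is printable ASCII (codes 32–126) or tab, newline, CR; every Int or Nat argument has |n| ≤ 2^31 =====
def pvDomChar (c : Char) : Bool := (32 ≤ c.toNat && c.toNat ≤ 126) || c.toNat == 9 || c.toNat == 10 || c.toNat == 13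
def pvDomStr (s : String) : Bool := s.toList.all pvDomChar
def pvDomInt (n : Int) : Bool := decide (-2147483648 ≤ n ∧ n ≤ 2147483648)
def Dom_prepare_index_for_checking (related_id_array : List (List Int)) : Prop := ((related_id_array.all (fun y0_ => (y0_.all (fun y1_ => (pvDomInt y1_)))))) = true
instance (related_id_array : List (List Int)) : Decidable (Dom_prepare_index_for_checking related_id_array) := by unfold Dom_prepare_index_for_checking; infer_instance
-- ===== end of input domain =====

-- B eliminates A's buffer of (len-1) corrections via the identity
-- i + buffer + class_count = class_count + cumulative row length, recursing over
-- the row list with one running position (objective: alternative, not faster).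

-- ===== PORT A =====
-- A: for i in range(5): append i; append i+buffer+class_count; buffer += len(arr[i])-1
-- (arr[i] out of range raises IndexError in Python; Pre_ excludes that, the none
-- branch here just leaves buffer unchanged and is unreachable under Pre_).
def prepare_index_for_checking (related_id_array : List (List Int)) : List Int :=
  let class_count : Int := related_id_array.length
  let st :=
    (PySem.List.pyRange 0 5 1).foldl
      (fun (st : List Int × Int) (i : Int) =>
        let index := st.1 ++ [i, i + st.2 + class_count]
        match PySem.List.pyGet? related_id_array i with
        | some a => (index, st.2 + (a.length : Int) - 1)
        | none => (index, st.2))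
      ([], 0)
  st.1

-- ===== PORT B =====
-- go(rows, i, pos): if i == 5 return []; else [i, pos] + go(rows[1:], i+1, pos+len(rows[0]))
-- (Python raises IndexError on rows == [] there; that is outside Pre_, the [] branch
-- here is unreachable under Pre_).
def goB : List (List Int) → Int → Int → List Int
  | rows, i, pos =>
    if i = 5 then []
    else
      match rows with
      | [] => []
      | r :: rs => i :: pos :: goB rs (i + 1) (pos + (r.length : Int))

def prepare_index_for_checking_alt (related_id_array : List (List Int)) : List Int :=
  goB related_id_array 0 (related_id_array.length : Int)

-- ===== PRECONDITION & SPEC =====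
-- Pre_: A indexes related_id_array[0..4], so it raises IndexError on fewer than 5 rows.
def Pre_prepare_index_for_checking (related_id_array : List (List Int)) : Prop :=
  5 ≤ related_id_array.length
instance (related_id_array : List (List Int)) : Decidable (Pre_prepare_index_for_checking related_id_array) := by unfold Pre_prepare_index_for_checking; infer_instance

def pvWitness_prepare_index_for_checking : List (List Int) := [[1], [2, 3], [], [4], [5]]

def Spec_prepare_index_for_checking (related_id_array : List (List Int)) (out : List Int) : Prop := out = prepare_index_for_checking_alt related_id_array
instance (related_id_array : List (List Int)) (out : List Int) : Decidable (Spec_prepare_index_for_checking related_id_array out) := by unfold Spec_prepare_index_for_checking; infer_instance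

-- ===== CLAIM =====
def Claim_equal_prepare_index_for_checking : Prop := ∀ (related_id_array : List (List Int)), Dom_prepare_index_for_checking related_id_array → Pre_prepare_index_for_checking related_id_array → Spec_prepare_index_for_checking related_id_array (prepare_index_for_checking related_id_array)

-- ===== LEMMAS AND PROOFS =====
theorem goB_five (rows : List (List Int)) (pos : Int) : goB rows 5 pos = [] := by
  cases rows <;> simp [goB]

theorem main_eq (related_id_array : List (List Int))
    (h : 5 ≤ related_id_array.length) :
    prepare_index_for_checking related_id_array
      = prepare_index_for_checking_alt related_id_array := by
  obtain ⟨a, b, c, d, e, rest, rfl⟩ :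
      ∃ a b c d e rest, related_id_array = a :: b :: c :: d :: e :: rest := by
    match related_id_array, h with
    | a :: b :: c :: d :: e :: rest, _ => exact ⟨a, b, c, d, e, rest, rfl⟩
  have g0 : PySem.List.pyGet? (a::b::c::d::e::rest) 0 = some a := by simp
  have g1 : PySem.List.pyGet? (a::b::c::d::e::rest) 1 = some b := by
    simpa using PySem.List.pyGet?_ofNat (a::b::c::d::e::rest) (n := 1) (by simp)
  have g2 : PySem.List.pyGet? (a::b::c::d::e::rest) 2 = some c := by
    simpa using PySem.List.pyGet?_ofNat (a::b::c::d::e::rest) (n := 2) (by simp)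
  have g3 : PySem.List.pyGet? (a::b::c::d::e::rest) 3 = some d := by
    simpa using PySem.List.pyGet?_ofNat (a::b::c::d::e::rest) (n := 3) (by simp)
  have g4 : PySem.List.pyGet? (a::b::c::d::e::rest) 4 = some e := by
    simpa using PySem.List.pyGet?_ofNat (a::b::c::d::e::rest) (n := 4) (by simp)
  simp [prepare_index_for_checking, prepare_index_for_checking_alt,
    goB, PySem.List.pyRange, List.range_succ, g0, g1, g2, g3, g4, goB_five]
  and_intros <;> omega

-- ===== VERDICT =====
theorem prepare_index_for_checking_spec : Claim_equal_prepare_index_for_checking := by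
  intro arr _ hpre
  exact main_eq arr hpre
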